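-- pv_equiv track=rewrite | github.com/ColarDriver/colarclaw | src/session/transcript_repair.py | strip_tool_result_details
-- ===== SOURCE A (Python) =====
-- def strip_tool_result_details(messages: list[dict]) -> list[dict]:
--     """Remove the 'details' field from toolResult messages."""
--     touched = False
--     out: list[dict] = []
--     for msg in messages:
--         if not isinstance(msg, dict) or msg.get("role") != "toolResult":
--             out.append(msg)
--             continue
--         if "details" not in msg:
--             out.append(msg)
--             continue
--         sanitized = {k: v for k, v in msg.items() if k != "details"}
--         touched = True
--         out.append(sanitized)
--     return out if touched else messages
-- ===== SOURCE B (Python) =====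
-- def strip_tool_result_details(messages: list[dict]) -> list[dict]:
--     """Remove the 'details' field from toolResult messages."""
--     def needs(m):
--         return isinstance(m, dict) and m.get("role") == "toolResult" and "details" in m
--     if not any(needs(m) for m in messages):
--         return messages
--     return [{k: v for k, v in m.items() if k != "details"} if needs(m) else m
--             for m in messages]
-- ===== Notes on version B (the rewrite author's own statement) =====
-- stated objective: simpler
-- what changed: Replaced the single-pass loop with a mutable 'touched' flag and accumulator list by a detect-then-transform decomposition: one 'any' pass decides whether stripping is needed, and if so one comprehension builds the result.
import Mathlib
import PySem

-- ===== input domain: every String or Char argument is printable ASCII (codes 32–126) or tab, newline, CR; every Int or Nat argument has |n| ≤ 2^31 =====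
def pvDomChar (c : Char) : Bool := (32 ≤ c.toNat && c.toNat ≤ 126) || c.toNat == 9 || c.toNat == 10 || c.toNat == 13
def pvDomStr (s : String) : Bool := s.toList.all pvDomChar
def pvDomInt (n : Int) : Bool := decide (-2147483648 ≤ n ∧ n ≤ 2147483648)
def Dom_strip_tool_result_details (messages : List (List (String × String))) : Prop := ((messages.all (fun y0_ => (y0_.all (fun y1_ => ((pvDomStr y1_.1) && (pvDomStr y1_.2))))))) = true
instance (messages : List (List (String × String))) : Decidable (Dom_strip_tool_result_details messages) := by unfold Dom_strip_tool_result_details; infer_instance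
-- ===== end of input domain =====

-- B replaces A's single-pass loop with a 'touched' flag by a detect-then-transform
-- two-pass decomposition (objective: simpler).

-- dict.get(k): first matching value in the association list
def pvDictGet (m : List (String × String)) (k : String) : Option String :=
  (m.find? (fun p => p.1 == k)).map (·.2)

-- ===== PORT A =====
-- loop state: (touched, out); each message appended as-is or sanitized
def pvStepA (st : Bool × List (List (String × String))) (msg : List (String × String)) :
    Bool × List (List (String × String)) :=
  if ¬ (pvDictGet msg "role" == some "toolResult") then (st.1, st.2 ++ [msg])
  else if ¬ (msg.any (fun p => p.1 == "details")) then (st.1, st.2 ++ [msg])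
  else (true, st.2 ++ [msg.filter (fun p => p.1 != "details")])

def strip_tool_result_details (messages : List (List (String × String))) : List (List (String × String)) :=
  let st := messages.foldl pvStepA (false, [])
  if st.1 then st.2 else messages

-- ===== PORT B =====
def pvNeeds (m : List (String × String)) : Bool :=
  (pvDictGet m "role" == some "toolResult") && m.any (fun p => p.1 == "details")

def strip_tool_result_details_alt (messages : List (List (String × String))) : List (List (String × String)) :=
  if ¬ (messages.any pvNeeds) then messages
  else messages.map (fun m => if pvNeeds m then m.filter (fun p => p.1 != "details") else m)

-- ===== PRECONDITION & SPEC =====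
def Spec_strip_tool_result_details (messages : List (List (String × String))) (out : List (List (String × String))) : Prop := out = strip_tool_result_details_alt messages
instance (messages : List (List (String × String))) (out : List (List (String × String))) : Decidable (Spec_strip_tool_result_details messages out) := by unfold Spec_strip_tool_result_details; infer_instance

-- ===== CLAIM (what is proved, stated in full; the proofs are below) =====
def Claim_equal_strip_tool_result_details : Prop := ∀ (messages : List (List (String × String))), Dom_strip_tool_result_details messages → Spec_strip_tool_result_details messages (strip_tool_result_details messages)

-- ===== LEMMAS AND PROOFS =====

-- invariant of A's loop: the flag becomes 'any pvNeeds', the accumulator the mapped list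
theorem pv_loop_inv (ms : List (List (String × String))) (t : Bool)
    (acc : List (List (String × String))) :
    ms.foldl pvStepA (t, acc)
    = (t || ms.any pvNeeds,
       acc ++ ms.map (fun m => if pvNeeds m then m.filter (fun p => p.1 != "details") else m)) := by
  induction ms generalizing t acc with
  | nil => simp
  | cons m rest ih =>
    rw [List.foldl_cons]
    by_cases h1 : (pvDictGet m "role" == some "toolResult") = true
    · by_cases h2 : (m.any (fun p => p.1 == "details")) = true
      · have hn : pvNeeds m = true := by simp [pvNeeds, h1, h2]
        have hs : pvStepA (t, acc) m = (true, acc ++ [m.filter (fun p => p.1 != "details")]) := by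
          simp [pvStepA, h1, h2]
        rw [hs, ih]
        simp [hn]
      · have hn : pvNeeds m = false := by simp [pvNeeds, h2]
        have hs : pvStepA (t, acc) m = (t, acc ++ [m]) := by
          simp [pvStepA, h2]
        rw [hs, ih]
        simp [hn]
    · have hn : pvNeeds m = false := by
        unfold pvNeeds
        rw [Bool.eq_false_iff.mpr h1, Bool.false_and]
      have hs : pvStepA (t, acc) m = (t, acc ++ [m]) := by
        simp [pvStepA, h1]
      rw [hs, ih]
      simp [hn]

-- ===== VERDICT (by name: the statement is the Claim_ definition above) =====
theorem strip_tool_result_details_spec : Claim_equal_strip_tool_result_details := by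
  intro messages _
  unfold Spec_strip_tool_result_details strip_tool_result_details strip_tool_result_details_alt
  rw [pv_loop_inv]
  by_cases h : messages.any pvNeeds = true <;> simp [h]
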